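-- pv_equiv track=rewrite | github.com/bartoszduch/Codeforces-Leetcode-problems-python | B.Pinball.py | shift
-- ===== SOURCE A (Python) =====
-- def shift(string, a, n,shiftCount,ns):#n dlugosc znaku, a-indeks od ktorego zaczynamy
--     if len(string)==1:
--         return 1
--     elif string[a] == '>':
--         string[a] = '<'
--         a += 1
--         shiftCount+=1
--         if a >=n:
--             string[:]=ns
--             return shiftCount
--         else:
--             return shift(string, a,n,shiftCount, ns)
--     elif string[a] == '<':
--         string[a] = '>'
--         a -= 1
--         shiftCount += 1
--         if a<0:
--             string[:]=ns
--             return shiftCount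
--         else:
--             return shift(string, a,n,shiftCount,ns)
-- ===== SOURCE B (Python) =====
-- def _lefts(string, a, n):
--     return [i for i in range(a, min(n, len(string))) if string[i] == '<']
--
-- def _rights(string, a):
--     return [i for i in range(a, -1, -1) if string[i] == '>']
--
-- def shift(string, a, n, shiftCount, ns):
--     if len(string) == 1:
--         return 1
--     c = string[a]
--     L = _lefts(string, a, n)
--     R = _rights(string, a)
--     p, q = len(L), len(R)
--     if c == '>':
--         if p < q:
--             return shiftCount + n + a + 2 * (sum(L) - sum(R[:p + 1]))
--         return shiftCount + 1 + a + 2 * (sum(L[:q]) - sum(R))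
--     elif c == '<':
--         if q < p:
--             return shiftCount + 1 - a + 2 * (sum(L[:q + 1]) - sum(R))
--         return shiftCount + n - a + 2 * (sum(L) - sum(R[:p]))
-- ===== Notes on version B (the rewrite author's own statement) =====
-- stated objective: alternative
-- what changed: A bounces the ball cell by cell through a recursive simulation that flips one arrow per call; B never simulates: it collects the positions of '<' right of a and '>' left of a once and returns the exit count by a closed-form sum over those turning points.
-- outside the precondition, e.g. on shift(['>', '<'], -1, 2, 0, []): A returns 1, B returns 0; on shift(['<', '>'], 1, 0, 0, []): A returns 1, B returns -1
import Mathlib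
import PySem

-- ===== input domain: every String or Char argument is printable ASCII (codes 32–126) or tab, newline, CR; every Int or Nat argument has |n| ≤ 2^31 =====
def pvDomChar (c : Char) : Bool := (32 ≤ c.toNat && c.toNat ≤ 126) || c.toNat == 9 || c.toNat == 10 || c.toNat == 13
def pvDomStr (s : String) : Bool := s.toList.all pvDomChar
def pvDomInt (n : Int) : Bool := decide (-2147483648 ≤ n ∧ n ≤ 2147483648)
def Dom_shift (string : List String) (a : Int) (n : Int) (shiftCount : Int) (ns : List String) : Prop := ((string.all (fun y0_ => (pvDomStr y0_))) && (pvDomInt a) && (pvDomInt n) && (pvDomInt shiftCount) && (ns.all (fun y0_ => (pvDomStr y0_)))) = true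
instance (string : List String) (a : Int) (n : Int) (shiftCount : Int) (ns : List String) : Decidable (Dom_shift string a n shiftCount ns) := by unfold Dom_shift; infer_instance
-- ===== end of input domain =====

-- B replaces A's cell-by-cell bounce recursion by a closed-form count over the positions of '<' right of a
-- and '>' left of a (objective: alternative algorithm).  Equivalence is about the RETURN value only:
-- the Python A also rewrites `string` in place (restoring it to `ns` on exit); B does not touch `string`.

-- ===== PORT A =====
-- Python A is recursive; the Nat fuel is a totality guard only: it is never exhausted on Pre_ inputs
-- (the proof shows the bounce takes at most 3*len^2+2*len+1 steps there).
-- `pyGetD string a ""` is Python's string[a] wherever it does not raise; where Python raises IndexError,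
-- and where Python falls off both elifs returning None, the port returns 0 — both are excluded by Pre_.
def shiftGo (fuel : Nat) (string : List String) (a : Int) (n : Int) (shiftCount : Int) (ns : List String) : Int :=
  match fuel with
  | 0 => 0
  | fuel' + 1 =>
    if string.length = 1 then 1
    else
      let c := PySem.List.pyGetD string a ""
      if c = ">" then
        let string' := PySem.List.pySetD string a "<"
        let a' := a + 1
        let sc := shiftCount + 1
        if a' ≥ n then sc else shiftGo fuel' string' a' n sc ns
      else if c = "<" then
        let string' := PySem.List.pySetD string a ">"
        let a' := a - 1
        let sc := shiftCount + 1
        if a' < 0 then sc else shiftGo fuel' string' a' n sc ns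
      else 0

def shift (string : List String) (a : Int) (n : Int) (shiftCount : Int) (ns : List String) : Int :=
  shiftGo (3 * string.length * string.length + 2 * string.length + 2) string a n shiftCount ns

-- ===== PORT B =====
-- helper for _lefts: the '<' positions in [a, b) — Source B's _lefts(string, a, n) is pvLefts string a (min n len)
def pvLefts (string : List String) (a : Int) (n : Int) : List Int :=
  (PySem.List.pyRange a n 1).filter (fun i => PySem.List.pyGetD string i "" == "<")

-- [i for i in range(a, -1, -1) if string[i] == '>']
def pvRights (string : List String) (a : Int) : List Int :=
  (PySem.List.pyRange a (-1) (-1)).filter (fun i => PySem.List.pyGetD string i "" == ">")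

-- Source B; its final fall-through (a non-arrow string[a]) returns None in Python — excluded by Pre_, 0 here.
def shift_alt (string : List String) (a : Int) (n : Int) (shiftCount : Int) (ns : List String) : Int :=
  if string.length = 1 then 1
  else
    let c := PySem.List.pyGetD string a ""
    let L := pvLefts string a (min n (string.length : Int))
    let R := pvRights string a
    let p := L.length
    let q := R.length
    if c = ">" then
      if p < q then shiftCount + n + a + 2 * (L.sum - (R.take (p + 1)).sum)
      else shiftCount + 1 + a + 2 * ((L.take q).sum - R.sum)
    else if c = "<" then
      if q < p then shiftCount + 1 - a + 2 * ((L.take (q + 1)).sum - R.sum)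
      else shiftCount + n - a + 2 * (L.sum - (R.take p).sum)
    else 0

-- ===== PRECONDITION & SPEC =====
-- Pre_ is the natural pinball domain (besides the len==1 early return): the arena string[0:n] exists
-- (n ≤ len), a is a valid non-negative index below n, and either every arena cell is an arrow, or the
-- ball leaves without reading any non-arrow cell: string[a:n] all '>' (straight right exit),
-- string[0:a+1] all '<' (straight left exit), or '<'*a + '><' at a (one bounce, then left exit) — in the
-- left-exit clauses n may even overrun the real list, since the ball never looks right of its bounce.
-- Outside Pre_ A raises IndexError, returns None on a non-arrow cell it reaches, or — for a negative a
-- or an arena bound n that disagrees with the real list on cells the ball crosses — returns a count for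
-- a wrapped/truncated arena that is an accident of indexing the real list while testing bounds against n.
def Pre_shift (string : List String) (a : Int) (n : Int) (shiftCount : Int) (ns : List String) : Prop :=
  string.length = 1 ∨
    (0 ≤ a ∧ a < n ∧
      ((n ≤ (string.length : Int) ∧
         ((∀ x ∈ string.take n.toNat, x = "<" ∨ x = ">") ∨
          (∀ x ∈ (string.take n.toNat).drop a.toNat, x = ">"))) ∨
       (a < (string.length : Int) ∧ ∀ x ∈ string.take (a+1).toNat, x = "<") ∨
       (a + 1 < n ∧ a + 1 < (string.length : Int) ∧ (∀ x ∈ string.take a.toNat, x = "<") ∧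
        string[a.toNat]? = some ">" ∧ string[(a+1).toNat]? = some "<")))
instance (string : List String) (a : Int) (n : Int) (shiftCount : Int) (ns : List String) : Decidable (Pre_shift string a n shiftCount ns) := by unfold Pre_shift; infer_instance

def pvWitness_shift : List String × Int × Int × Int × List String := (["<", ">"], 0, 2, 0, ["<", ">"])

def Spec_shift (string : List String) (a : Int) (n : Int) (shiftCount : Int) (ns : List String) (out : Int) : Prop := out = shift_alt string a n shiftCount ns
instance (string : List String) (a : Int) (n : Int) (shiftCount : Int) (ns : List String) (out : Int) : Decidable (Spec_shift string a n shiftCount ns out) := by unfold Spec_shift; infer_instance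

-- ===== CLAIM (what is proved, stated in full; the proofs are below) =====
def Claim_equal_shift : Prop := ∀ (string : List String) (a : Int) (n : Int) (shiftCount : Int) (ns : List String), Dom_shift string a n shiftCount ns → Pre_shift string a n shiftCount ns → Spec_shift string a n shiftCount ns (shift string a n shiftCount ns)

-- ===== LEMMAS AND PROOFS =====

-- the valid simulation states (the len ≠ 1 half of Pre_, with the arena condition per index)
def PVValid (s : List String) (a : Int) (n : Int) : Prop :=
  0 ≤ a ∧ a < n ∧ n ≤ (s.length : Int) ∧
    (∀ i : Int, 0 ≤ i → i < n →
      (PySem.List.pyGetD s i "" = "<" ∨ PySem.List.pyGetD s i "" = ">")) ∧ s.length ≠ 1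

-- B's count for shiftCount = 0 (ns is unused by shift_alt)
def pvF (s : List String) (a : Int) (n : Int) : Int := shift_alt s a n 0 []

theorem pvLefts_nil (s : List String) {a n : Int} (h : n ≤ a) : pvLefts s a n = [] := by
  simp [pvLefts, PySem.List.pyRange_one_eq_nil h]

theorem pvLefts_cons (s : List String) {a n : Int} (h : a < n) :
    pvLefts s a n = if PySem.List.pyGetD s a "" = "<" then a :: pvLefts s (a+1) n else pvLefts s (a+1) n := by
  rw [pvLefts, PySem.List.pyRange_one_cons h, List.filter_cons]
  split_ifs with h1 h2 h2 <;> simp_all [pvLefts]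

theorem pvRights_nil (s : List String) {a : Int} (h : a < 0) : pvRights s a = [] := by
  simp [pvRights, PySem.List.pyRange_neg_one_eq_nil (by omega : a ≤ -1)]

theorem pvRights_cons (s : List String) {a : Int} (h : 0 ≤ a) :
    pvRights s a = if PySem.List.pyGetD s a "" = ">" then a :: pvRights s (a-1) else pvRights s (a-1) := by
  rw [pvRights, PySem.List.pyRange_neg_one_cons (by omega : (-1:Int) < a), List.filter_cons]
  split_ifs with h1 h2 h2 <;> simp_all [pvRights]

theorem pvLefts_congr {s t : List String} {a n : Int}
    (h : ∀ i, a ≤ i → i < n → PySem.List.pyGetD s i "" = PySem.List.pyGetD t i "") :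
    pvLefts s a n = pvLefts t a n := by
  unfold pvLefts
  apply List.filter_congr
  intro i hi
  rcases PySem.List.mem_pyRange_one.1 hi with ⟨h1, h2⟩
  rw [h i h1 h2]

theorem pvRights_congr {s t : List String} {a : Int}
    (h : ∀ i, 0 ≤ i → i ≤ a → PySem.List.pyGetD s i "" = PySem.List.pyGetD t i "") :
    pvRights s a = pvRights t a := by
  unfold pvRights
  apply List.filter_congr
  intro i hi
  rcases PySem.List.mem_pyRange_neg_one.1 hi with ⟨h1, h2⟩
  rw [h i (by omega) h2]

theorem pvMem_lefts {s : List String} {a n x : Int} (h : x ∈ pvLefts s a n) :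
    a ≤ x ∧ x < n ∧ PySem.List.pyGetD s x "" = "<" := by
  unfold pvLefts at h
  rcases List.mem_filter.1 h with ⟨hr, hc⟩
  rcases PySem.List.mem_pyRange_one.1 hr with ⟨h1, h2⟩
  exact ⟨h1, h2, by simpa using hc⟩

theorem pvMem_rights {s : List String} {a x : Int} (h : x ∈ pvRights s a) :
    0 ≤ x ∧ x ≤ a ∧ PySem.List.pyGetD s x "" = ">" := by
  unfold pvRights at h
  rcases List.mem_filter.1 h with ⟨hr, hc⟩
  rcases PySem.List.mem_pyRange_neg_one.1 hr with ⟨h1, h2⟩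
  exact ⟨by omega, h2, by simpa using hc⟩

-- Python indexing after string[a] = v, for non-negative indices
theorem pvGetD_setD {s : List String} {a i : Int} (v : String)
    (ha0 : 0 ≤ a) (hal : a < (s.length : Int)) (hi : 0 ≤ i) :
    PySem.List.pyGetD (PySem.List.pySetD s a v) i "" = if i = a then v else PySem.List.pyGetD s i "" := by
  have ha : a = ((a.toNat : Nat) : Int) := by omega
  have hi' : i = ((i.toNat : Nat) : Int) := by omega
  rw [ha, hi', PySem.List.pyGetD_pySetD_natCast s a.toNat i.toNat v "" (by omega)]
  split_ifs with h1 h2 h2 <;> first | rfl | omega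

theorem pvF_gt {s : List String} {a n : Int} (hlen : s.length ≠ 1) (hnl : n ≤ (s.length : Int))
    (hc : PySem.List.pyGetD s a "" = ">") :
    pvF s a n =
      (if (pvLefts s a n).length < (pvRights s a).length then
        n + a + 2 * ((pvLefts s a n).sum - ((pvRights s a).take ((pvLefts s a n).length + 1)).sum)
      else 1 + a + 2 * (((pvLefts s a n).take (pvRights s a).length).sum - (pvRights s a).sum)) := by
  simp [pvF, shift_alt, hlen, hc, min_eq_left hnl]

theorem pvF_lt {s : List String} {a n : Int} (hlen : s.length ≠ 1) (hnl : n ≤ (s.length : Int))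
    (hc : PySem.List.pyGetD s a "" = "<") :
    pvF s a n =
      (if (pvRights s a).length < (pvLefts s a n).length then
        1 - a + 2 * (((pvLefts s a n).take ((pvRights s a).length + 1)).sum - (pvRights s a).sum)
      else n - a + 2 * ((pvLefts s a n).sum - ((pvRights s a).take (pvLefts s a n).length).sum)) := by
  simp [pvF, shift_alt, hlen, hc, min_eq_left hnl]

-- exit to the right: last cell, pointing right
theorem pvF_exitR {s : List String} {a n : Int} (hv : PVValid s a n)
    (hc : PySem.List.pyGetD s a "" = ">") (h : n ≤ a + 1) : pvF s a n = 1 := by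
  rcases hv with ⟨h2, h3, h1, h4, h5⟩
  have hL : pvLefts s a n = [] := by
    rw [pvLefts_cons s h3, if_neg (by simp [hc]), pvLefts_nil s (by omega)]
  have hR : pvRights s a = a :: pvRights s (a-1) := by rw [pvRights_cons s h2, if_pos hc]
  rw [pvF_gt (by omega) h1 hc, hL, hR]
  simp
  omega

-- exit to the left: first cell, pointing left
theorem pvF_exitL {s : List String} {a n : Int} (hv : PVValid s a n)
    (hc : PySem.List.pyGetD s a "" = "<") (h : a - 1 < 0) : pvF s a n = 1 := by
  rcases hv with ⟨h2, h3, h1, h4, h5⟩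
  have ha : a = 0 := by omega
  subst ha
  have hR : pvRights s 0 = [] := by
    rw [pvRights_cons s le_rfl, if_neg (by simp [hc]), pvRights_nil s (by omega)]
  have hL : pvLefts s 0 n = 0 :: pvLefts s 1 n := by
    rw [pvLefts_cons s h3, if_pos hc]; norm_num
  rw [pvF_lt (by omega) h1 hc, hL, hR]
  simp

-- one step right: the count drops by exactly one
theorem pvF_stepR {s : List String} {a n : Int} (hv : PVValid s a n)
    (hc : PySem.List.pyGetD s a "" = ">") (h : a + 1 < n) :
    pvF s a n = 1 + pvF (PySem.List.pySetD s a "<") (a + 1) n := by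
  rcases hv with ⟨h2, h3, h1, h4, h5⟩
  set s' := PySem.List.pySetD s a "<" with hs'
  have hlen' : s'.length = s.length := by
    rw [hs', PySem.List.pySetD_of_nonneg s _ h2]; simp
  have hG' : ∀ i : Int, 0 ≤ i →
      PySem.List.pyGetD s' i "" = if i = a then "<" else PySem.List.pyGetD s i "" :=
    fun i hi => pvGetD_setD "<" h2 (by omega) hi
  have hLa : pvLefts s a n = pvLefts s (a+1) n := by
    rw [pvLefts_cons s h3, if_neg (by simp [hc])]
  have hL' : pvLefts s' (a+1) n = pvLefts s (a+1) n := by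
    apply pvLefts_congr
    intro i hi _
    rw [hG' i (by omega), if_neg (by omega)]
  have hR0 : pvRights s a = a :: pvRights s (a-1) := by
    rw [pvRights_cons s h2, if_pos hc]
  have hR'a : pvRights s' a = pvRights s (a-1) := by
    rw [pvRights_cons s' h2, if_neg (by rw [hG' a h2, if_pos rfl]; decide), ]
    apply pvRights_congr
    intro i hi hia
    rw [hG' i hi, if_neg (by omega)]
  have hGnext : PySem.List.pyGetD s' (a+1) "" = PySem.List.pyGetD s (a+1) "" := by
    rw [hG' (a+1) (by omega), if_neg (by omega)]
  have hR' : pvRights s' (a+1) =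
      if PySem.List.pyGetD s (a+1) "" = ">" then (a+1) :: pvRights s (a-1) else pvRights s (a-1) := by
    rw [pvRights_cons s' (by omega : (0:Int) ≤ a + 1), hGnext]
    have : a + 1 - 1 = a := by ring
    rw [this, hR'a]
  rcases h4 (a+1) (by omega) (by omega) with hd | hd
  · -- next cell '<'
    have hLsplit : pvLefts s (a+1) n = (a+1) :: pvLefts s (a+2) n := by
      rw [pvLefts_cons s h, if_pos hd]
      congr 1
      have : a + 1 + 1 = a + 2 := by ring
      rw [this]
    set L1 := pvLefts s (a+2) n
    set R0 := pvRights s (a-1)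
    rw [pvF_gt (by omega) h1 hc, pvF_lt (by omega) (by omega) (by rw [hGnext]; exact hd)]
    rw [hLa, hL', hR0, hR']
    rw [if_neg (show ¬ PySem.List.pyGetD s (a+1) "" = ">" by simp [hd])]
    rw [hLsplit]
    simp only [List.length_cons, List.take_succ_cons, List.sum_cons]
    split_ifs <;> first | omega | ring
  · -- next cell '>'
    set L := pvLefts s (a+1) n
    set R0 := pvRights s (a-1)
    rw [pvF_gt (by omega) h1 hc, pvF_gt (by omega) (by omega) (by rw [hGnext]; exact hd)]
    rw [hLa, hL', hR0, hR']
    rw [if_pos hd]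
    simp only [List.length_cons, List.take_succ_cons, List.sum_cons]
    split_ifs <;> first | omega | ring

-- one step left
theorem pvF_stepL {s : List String} {a n : Int} (hv : PVValid s a n)
    (hc : PySem.List.pyGetD s a "" = "<") (h : 0 ≤ a - 1) :
    pvF s a n = 1 + pvF (PySem.List.pySetD s a ">") (a - 1) n := by
  rcases hv with ⟨h2, h3, h1, h4, h5⟩
  set s' := PySem.List.pySetD s a ">" with hs'
  have hlen' : s'.length = s.length := by
    rw [hs', PySem.List.pySetD_of_nonneg s _ h2]; simp
  have hG' : ∀ i : Int, 0 ≤ i →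
      PySem.List.pyGetD s' i "" = if i = a then ">" else PySem.List.pyGetD s i "" :=
    fun i hi => pvGetD_setD ">" h2 (by omega) hi
  have hRa : pvRights s a = pvRights s (a-1) := by
    rw [pvRights_cons s h2, if_neg (by simp [hc])]
  have hR' : pvRights s' (a-1) = pvRights s (a-1) := by
    apply pvRights_congr
    intro i hi hia
    rw [hG' i hi, if_neg (by omega)]
  have hLsplit : pvLefts s a n = a :: pvLefts s (a+1) n := by
    rw [pvLefts_cons s h3, if_pos hc]
  have hL'a : pvLefts s' a n = pvLefts s (a+1) n := by
    rw [pvLefts_cons s' (by omega : a < n), if_neg (by rw [hG' a h2, if_pos rfl]; decide)]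
    apply pvLefts_congr
    intro i hi _
    rw [hG' i (by omega), if_neg (by omega)]
  have hGprev : PySem.List.pyGetD s' (a-1) "" = PySem.List.pyGetD s (a-1) "" := by
    rw [hG' (a-1) h, if_neg (by omega)]
  have hL' : pvLefts s' (a-1) n =
      if PySem.List.pyGetD s (a-1) "" = "<" then (a-1) :: pvLefts s (a+1) n else pvLefts s (a+1) n := by
    rw [pvLefts_cons s' (by omega : a - 1 < n), hGprev]
    have : a - 1 + 1 = a := by ring
    rw [this, hL'a]
  rcases h4 (a-1) h (by omega) with hd | hd
  · -- previous cell '<'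
    rw [pvF_lt (by omega) h1 hc, pvF_lt (by omega) (by omega) (by rw [hGprev]; exact hd)]
    rw [hRa, hR', hLsplit, hL']
    rw [if_pos hd]
    simp only [List.length_cons, List.take_succ_cons, List.sum_cons]
    split_ifs <;> first | omega | ring
  · -- previous cell '>'
    rw [pvF_lt (by omega) h1 hc, pvF_gt (by omega) (by omega) (by rw [hGprev]; exact hd)]
    rw [hRa, hR', hLsplit, hL']
    rw [if_neg (show ¬ PySem.List.pyGetD s (a-1) "" = "<" by simp [hd])]
    simp only [List.length_cons, List.take_succ_cons, List.sum_cons]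
    split_ifs <;> first | omega | ring

theorem pvSum_ge {l : List Int} {M : Int} (h : ∀ x ∈ l, M ≤ x) : (l.length : Int) * M ≤ l.sum := by
  have := List.card_nsmul_le_sum l M h
  simpa [nsmul_eq_mul] using this

theorem pvSum_le {l : List Int} {M : Int} (h : ∀ x ∈ l, x ≤ M) : l.sum ≤ (l.length : Int) * M := by
  have := List.sum_le_card_nsmul l M h
  simpa [nsmul_eq_mul] using this

theorem pvSumTake_ge {l : List Int} (k : Nat) {M : Int} (h : ∀ x ∈ l, M ≤ x) :
    ((l.take k).length : Int) * M ≤ (l.take k).sum :=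
  pvSum_ge (fun x hx => h x (List.mem_of_mem_take hx))

theorem pvSumTake_le {l : List Int} (k : Nat) {M : Int} (h : ∀ x ∈ l, x ≤ M) :
    (l.take k).sum ≤ ((l.take k).length : Int) * M :=
  pvSum_le (fun x hx => h x (List.mem_of_mem_take hx))

theorem pvF_pos {s : List String} {a n : Int} (hv : PVValid s a n) : 1 ≤ pvF s a n := by
  rcases hv with ⟨h2, h3, h1, h4, h5⟩
  rcases h4 a h2 h3 with hc | hc
  · -- '<'
    have hmemL : ∀ x ∈ pvLefts s a n, a ≤ x := fun x hx => (pvMem_lefts hx).1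
    have hmemR : ∀ x ∈ pvRights s a, x ≤ a - 1 := by
      intro x hx
      rcases pvMem_rights hx with ⟨hx0, hx1, hx2⟩
      have : x ≠ a := fun he => by rw [he, hc] at hx2; exact absurd hx2 (by decide)
      omega
    rw [pvF_lt (by omega) h1 hc]
    split_ifs with hb
    · have hlt : (((pvLefts s a n).take ((pvRights s a).length + 1)).length : Int)
          = ((pvRights s a).length : Int) + 1 := by
        rw [List.length_take]
        have : (pvRights s a).length + 1 ≤ (pvLefts s a n).length := by omega
        simp [Nat.min_eq_left this]
      have g1 := pvSumTake_ge ((pvRights s a).length + 1) hmemL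
      have g2 := pvSum_le hmemR
      rw [hlt] at g1
      nlinarith [g1, g2, h2]
    · have g1 := pvSum_ge hmemL
      have g2 := pvSumTake_le (pvLefts s a n).length hmemR
      have hlt : (((pvRights s a).take (pvLefts s a n).length).length : Int)
          ≤ ((pvLefts s a n).length : Int) := by
        rw [List.length_take]; exact_mod_cast Nat.min_le_left _ _
      have hnn : (0:Int) ≤ ((pvRights s a).take (pvLefts s a n).length).length := by positivity
      nlinarith [g1, g2, h3, hlt, hnn]
  · -- '>'
    have hmemL : ∀ x ∈ pvLefts s a n, a + 1 ≤ x := by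
      intro x hx
      rcases pvMem_lefts hx with ⟨hx0, hx1, hx2⟩
      have : x ≠ a := fun he => by rw [he, hc] at hx2; exact absurd hx2 (by decide)
      omega
    have hmemR : ∀ x ∈ pvRights s a, x ≤ a := fun x hx => (pvMem_rights hx).2.1
    rw [pvF_gt (by omega) h1 hc]
    split_ifs with hb
    · have hlt : (((pvRights s a).take ((pvLefts s a n).length + 1)).length : Int)
          = ((pvLefts s a n).length : Int) + 1 := by
        rw [List.length_take]
        have : (pvLefts s a n).length + 1 ≤ (pvRights s a).length := by omega
        simp [Nat.min_eq_left this]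
      have g1 := pvSum_ge hmemL
      have g2 := pvSumTake_le ((pvLefts s a n).length + 1) hmemR
      rw [hlt] at g2
      nlinarith [g1, g2, h3]
    · have g1 := pvSumTake_ge (pvRights s a).length hmemL
      have g2 := pvSum_le hmemR
      have hlt : (((pvLefts s a n).take (pvRights s a).length).length : Int)
          = ((pvRights s a).length : Int) := by
        rw [List.length_take]
        have : (pvRights s a).length ≤ (pvLefts s a n).length := by omega
        simp [Nat.min_eq_left this]
      rw [hlt] at g1
      nlinarith [g1, g2, h2]

theorem pvF_bound {s : List String} {a n : Int} (hv : PVValid s a n) :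
    pvF s a n ≤ 3 * (s.length : Int) * s.length + 2 * s.length + 1 := by
  rcases hv with ⟨h2, h3, h1, h4, h5⟩
  have hmemLub : ∀ x ∈ pvLefts s a n, x ≤ n - 1 := by
    intro x hx; have := (pvMem_lefts hx).2.1; omega
  have hmemRlb : ∀ x ∈ pvRights s a, (0:Int) ≤ x := fun x hx => (pvMem_rights hx).1
  have hLlen : ((pvLefts s a n).length : Int) ≤ n := by
    have hf : (pvLefts s a n).length ≤ (PySem.List.pyRange a n 1).length := List.length_filter_le _ _
    rw [PySem.List.length_pyRange_one] at hf
    have : ((n - a).toNat : Int) ≤ n := by omega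
    calc ((pvLefts s a n).length : Int) ≤ ((n-a).toNat : Int) := by exact_mod_cast hf
      _ ≤ n := this
  -- every (partial) sum over L is at most n * (n - 1); every (partial) sum over R is nonnegative
  have hLs : ∀ k : Nat, ((pvLefts s a n).take k).sum ≤ n * (n - 1) := by
    intro k
    have g := pvSumTake_le k hmemLub
    have hlen : (((pvLefts s a n).take k).length : Int) ≤ n := by
      rw [List.length_take]
      have := Nat.min_le_right k (pvLefts s a n).length
      calc (((min k (pvLefts s a n).length) : Nat) : Int) ≤ ((pvLefts s a n).length : Int) := by exact_mod_cast this
        _ ≤ n := hLlen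
    have hn1 : (0:Int) ≤ n - 1 := by omega
    have hnn : (0:Int) ≤ (((pvLefts s a n).take k).length : Int) := by positivity
    nlinarith [g, hlen, hn1, hnn]
  have hLfull : (pvLefts s a n).sum ≤ n * (n - 1) := by
    have := hLs (pvLefts s a n).length
    rwa [List.take_length] at this
  have hRs : ∀ k : Nat, (0:Int) ≤ ((pvRights s a).take k).sum := by
    intro k
    have g := pvSumTake_ge k hmemRlb
    simpa using g
  have hRfull : (0:Int) ≤ (pvRights s a).sum := by
    have := hRs (pvRights s a).length
    rwa [List.take_length] at this
  have hn1 : (1:Int) ≤ n := by omega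
  rcases h4 a h2 h3 with hc | hc
  · rw [pvF_lt (by omega) h1 hc]
    split_ifs with hb
    · have := hLs ((pvRights s a).length + 1)
      nlinarith [this, hRfull, h2, h3, h1, hn1, sq_nonneg ((s.length : Int) - n)]
    · have := hRs (pvLefts s a n).length
      nlinarith [hLfull, this, h2, h3, h1, hn1, sq_nonneg ((s.length : Int) - n)]
  · rw [pvF_gt (by omega) h1 hc]
    split_ifs with hb
    · have := hRs ((pvLefts s a n).length + 1)
      nlinarith [hLfull, this, h2, h3, h1, hn1, sq_nonneg ((s.length : Int) - n)]
    · have := hLs (pvRights s a).length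
      nlinarith [this, hRfull, h2, h3, h1, hn1, sq_nonneg ((s.length : Int) - n)]

theorem pvValid_step {s : List String} {a n d : Int} (hv : PVValid s a n) (v : String)
    (hvok : v = "<" ∨ v = ">") (hd : 0 ≤ a + d) (hd' : a + d < n) :
    PVValid (PySem.List.pySetD s a v) (a + d) n := by
  rcases hv with ⟨h2, h3, h1, h4, h5⟩
  have hlen : (PySem.List.pySetD s a v).length = s.length := by
    rw [PySem.List.pySetD_of_nonneg s _ h2]; simp
  refine ⟨hd, hd', by rw [hlen]; exact h1, ?_, by rw [hlen]; exact h5⟩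
  intro i hi0 hi1
  rw [pvGetD_setD v h2 (by omega) hi0]
  split_ifs with hia
  · exact hvok
  · exact h4 i hi0 hi1

theorem pvShiftGo_eq (fuel : Nat) : ∀ (s : List String) (a n c : Int) (ns : List String),
    PVValid s a n → pvF s a n ≤ (fuel : Int) → shiftGo fuel s a n c ns = c + pvF s a n := by
  induction fuel with
  | zero =>
    intro s a n c ns hv hf
    have := pvF_pos hv
    norm_num at hf
    omega
  | succ fuel ih =>
    intro s a n c ns hv hf
    have hv' := hv
    rcases hv' with ⟨h2, h3, h1, h4, h5⟩
    have hne : s.length ≠ 1 := by omega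
    rcases h4 a h2 h3 with hc | hc
    · -- '<'
      rw [shiftGo, if_neg hne, hc, if_neg (by decide : ¬ ("<" : String) = ">"),
        if_pos (by decide : ("<" : String) = "<")]
      by_cases hx : a - 1 < 0
      · simp [hx, pvF_exitL hv hc hx]
      · rw [if_neg hx]
        have hstep := pvF_stepL hv hc (by omega)
        have hv2 : PVValid (PySem.List.pySetD s a ">") (a + (-1)) n :=
          pvValid_step hv ">" (Or.inr rfl) (by omega) (by omega)
        have hv2' : PVValid (PySem.List.pySetD s a ">") (a - 1) n := by
          have : a + (-1) = a - 1 := by ring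
          rwa [this] at hv2
        rw [ih _ _ _ _ _ hv2' (by push_cast at hf ⊢; omega)]
        rw [hstep]; ring
    · -- '>'
      rw [shiftGo, if_neg hne, hc, if_pos (by decide : (">" : String) = ">")]
      by_cases hx : a + 1 ≥ n
      · simp [hx, pvF_exitR hv hc hx]
      · rw [if_neg hx]
        have hstep := pvF_stepR hv hc (by omega)
        have hv2 : PVValid (PySem.List.pySetD s a "<") (a + 1) n :=
          pvValid_step hv "<" (Or.inl rfl) (by omega) (by omega)
        rw [ih _ _ _ _ _ hv2 (by push_cast at hf ⊢; omega)]
        rw [hstep]; ring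

theorem pvAlt_shiftCount {s : List String} {a : Int} (n sc : Int) (ns : List String) (hlen : s.length ≠ 1)
    (hc : PySem.List.pyGetD s a "" = "<" ∨ PySem.List.pyGetD s a "" = ">") :
    shift_alt s a n sc ns = sc + pvF s a n := by
  simp only [shift_alt, pvF, hlen, if_false]
  rcases hc with hc | hc <;> simp only [hc] <;> split_ifs <;> ring

-- a run of '<' from a down to 0 exits left in a+1 steps, never reading any other cell
theorem pvRights_none {s : List String} {a : Int}
    (h : ∀ i : Int, 0 ≤ i → i ≤ a → PySem.List.pyGetD s i "" = "<") : pvRights s a = [] := by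
  unfold pvRights
  rw [List.filter_eq_nil_iff]
  intro x hx
  rcases PySem.List.mem_pyRange_neg_one.1 hx with ⟨h1, h2⟩
  simp [h x (by omega) h2]

theorem pvLefts_none {s : List String} {a n : Int}
    (h : ∀ i : Int, a ≤ i → i < n → PySem.List.pyGetD s i "" = ">") : pvLefts s a n = [] := by
  unfold pvLefts
  rw [List.filter_eq_nil_iff]
  intro x hx
  rcases PySem.List.mem_pyRange_one.1 hx with ⟨h1, h2⟩
  simp [h x h1 h2]

theorem pvAlt_leftRun {s : List String} {a n : Int} (sc : Int) (ns : List String)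
    (hlen : s.length ≠ 1) (ha0 : 0 ≤ a) (h3 : a < n) (halen : a < (s.length : Int))
    (hL : ∀ i : Int, 0 ≤ i → i ≤ a → PySem.List.pyGetD s i "" = "<") :
    shift_alt s a n sc ns = sc + a + 1 := by
  have hc : PySem.List.pyGetD s a "" = "<" := hL a ha0 le_rfl
  have hR : pvRights s a = [] := pvRights_none hL
  have hLsplit : pvLefts s a (min n (s.length : Int))
      = a :: pvLefts s (a+1) (min n (s.length : Int)) := by
    rw [pvLefts_cons s (by omega : a < min n (s.length : Int)), if_pos hc]
  simp only [shift_alt, hlen, if_false, hc, hR, hLsplit]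
  simp [List.take_succ_cons]
  ring

theorem pvAlt_rightRun {s : List String} {a n : Int} (sc : Int) (ns : List String)
    (hlen : s.length ≠ 1) (hnl : n ≤ (s.length : Int)) (ha0 : 0 ≤ a) (h3 : a < n)
    (hR : ∀ i : Int, a ≤ i → i < n → PySem.List.pyGetD s i "" = ">") :
    shift_alt s a n sc ns = sc + n - a := by
  have hc : PySem.List.pyGetD s a "" = ">" := hR a le_rfl h3
  have hLn : pvLefts s a n = [] := pvLefts_none hR
  have hRsplit : pvRights s a = a :: pvRights s (a-1) := by
    rw [pvRights_cons s ha0, if_pos hc]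
  simp only [shift_alt, hlen, if_false, hc, min_eq_left hnl, hLn, hRsplit]
  simp [List.take_succ_cons]
  ring

theorem pvGoLeft : ∀ (fuel : Nat) (s : List String) (a n c : Int) (ns : List String),
    s.length ≠ 1 → 0 ≤ a → a < (s.length : Int) →
    (∀ i : Int, 0 ≤ i → i ≤ a → PySem.List.pyGetD s i "" = "<") →
    a < (fuel : Int) → shiftGo fuel s a n c ns = c + a + 1 := by
  intro fuel
  induction fuel with
  | zero => intro s a n c ns _ h2 _ _ hf; norm_num at hf; omega
  | succ fuel ih =>
    intro s a n c ns hne h2 hlen hall hf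
    have hc : PySem.List.pyGetD s a "" = "<" := hall a h2 le_rfl
    rw [shiftGo, if_neg hne, hc, if_neg (by decide : ¬ ("<" : String) = ">"),
      if_pos (by decide : ("<" : String) = "<")]
    by_cases hx : a - 1 < 0
    · rw [if_pos hx]; omega
    · rw [if_neg hx]
      have hlen' : (PySem.List.pySetD s a ">").length = s.length := by
        rw [PySem.List.pySetD_of_nonneg s _ h2]; simp
      rw [ih (PySem.List.pySetD s a ">") (a-1) n (c+1) ns (by omega) (by omega) (by omega)
        (fun i hi0 hi1 => by
          rw [pvGetD_setD ">" h2 hlen hi0, if_neg (by omega)]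
          exact hall i hi0 (by omega))
        (by push_cast at hf ⊢; omega)]
      ring

theorem pvGoRight : ∀ (fuel : Nat) (s : List String) (a n c : Int) (ns : List String),
    s.length ≠ 1 → 0 ≤ a → a < n → n ≤ (s.length : Int) →
    (∀ i : Int, a ≤ i → i < n → PySem.List.pyGetD s i "" = ">") →
    n - a ≤ (fuel : Int) → shiftGo fuel s a n c ns = c + n - a := by
  intro fuel
  induction fuel with
  | zero => intro s a n c ns _ _ h3 _ _ hf; norm_num at hf; omega
  | succ fuel ih =>
    intro s a n c ns hne h2 h3 hnl hall hf
    have hc : PySem.List.pyGetD s a "" = ">" := hall a le_rfl h3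
    rw [shiftGo, if_neg hne, hc, if_pos (by decide : (">" : String) = ">")]
    by_cases hx : a + 1 ≥ n
    · rw [if_pos hx]; omega
    · rw [if_neg hx]
      have hlen : a < (s.length : Int) := by omega
      have hlen' : (PySem.List.pySetD s a "<").length = s.length := by
        rw [PySem.List.pySetD_of_nonneg s _ h2]; simp
      rw [ih (PySem.List.pySetD s a "<") (a+1) n (c+1) ns (by omega) (by omega) (by omega)
        (by omega)
        (fun i hi0 hi1 => by
          rw [pvGetD_setD "<" h2 hlen (by omega), if_neg (by omega)]
          exact hall i (by omega) hi1)
        (by push_cast at hf ⊢; omega)]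
      ring

theorem pvAlt_bounce {s : List String} {a n : Int} (sc : Int) (ns : List String)
    (hlen : s.length ≠ 1) (ha0 : 0 ≤ a) (h3 : a + 1 < n) (halen : a + 1 < (s.length : Int))
    (hpref : ∀ i : Int, 0 ≤ i → i < a → PySem.List.pyGetD s i "" = "<")
    (hca : PySem.List.pyGetD s a "" = ">") (hcb : PySem.List.pyGetD s (a+1) "" = "<") :
    shift_alt s a n sc ns = sc + a + 3 := by
  have hR0 : pvRights s (a-1) = [] := pvRights_none (fun i hi0 hi1 => hpref i hi0 (by omega))
  have hRsplit : pvRights s a = [a] := by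
    rw [pvRights_cons s ha0, if_pos hca, hR0]
  have hLsplit : pvLefts s a (min n (s.length : Int))
      = (a+1) :: pvLefts s (a+2) (min n (s.length : Int)) := by
    rw [pvLefts_cons s (by omega : a < min n (s.length : Int)), if_neg (by simp [hca]),
      pvLefts_cons s (by omega : a + 1 < min n (s.length : Int)), if_pos hcb]
    congr 2
    omega
  simp only [shift_alt, hlen, if_false, hca, hRsplit, hLsplit]
  simp [List.take_succ_cons]
  ring

theorem pvGoBounce (fuel : Nat) {s : List String} {a n : Int} (c : Int) (ns : List String)
    (hlen : s.length ≠ 1) (ha0 : 0 ≤ a) (h3 : a + 1 < n) (halen : a + 1 < (s.length : Int))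
    (hpref : ∀ i : Int, 0 ≤ i → i < a → PySem.List.pyGetD s i "" = "<")
    (hca : PySem.List.pyGetD s a "" = ">") (hcb : PySem.List.pyGetD s (a+1) "" = "<")
    (hf : a + 2 < (fuel : Int)) :
    shiftGo fuel s a n c ns = c + a + 3 := by
  obtain ⟨f1, rfl⟩ : ∃ f1, fuel = f1 + 1 := ⟨fuel - 1, by omega⟩
  rw [shiftGo, if_neg hlen, hca, if_pos (by decide : (">" : String) = ">"), if_neg (by omega)]
  obtain ⟨f2, rfl⟩ : ∃ f2, f1 = f2 + 1 := ⟨f1 - 1, by omega⟩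
  set s1 := PySem.List.pySetD s a "<" with hs1
  have hlen1 : s1.length = s.length := by
    rw [hs1, PySem.List.pySetD_of_nonneg s _ ha0]; simp
  have hG1 : ∀ i : Int, 0 ≤ i →
      PySem.List.pyGetD s1 i "" = if i = a then "<" else PySem.List.pyGetD s i "" :=
    fun i hi => pvGetD_setD "<" ha0 (by omega) hi
  have hG1b : PySem.List.pyGetD s1 (a+1) "" = "<" := by
    rw [hG1 (a+1) (by omega), if_neg (by omega)]; exact hcb
  rw [shiftGo, if_neg (by omega), hG1b, if_neg (by decide : ¬ ("<" : String) = ">"),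
    if_pos (by decide : ("<" : String) = "<"), if_neg (by omega : ¬ a + 1 - 1 < 0)]
  set s2 := PySem.List.pySetD s1 (a+1) ">" with hs2
  have hlen2 : s2.length = s1.length := by
    rw [hs2, PySem.List.pySetD_of_nonneg s1 _ (by omega)]; simp
  have hG2 : ∀ i : Int, 0 ≤ i →
      PySem.List.pyGetD s2 i "" = if i = a + 1 then ">" else PySem.List.pyGetD s1 i "" :=
    fun i hi => pvGetD_setD ">" (by omega) (by omega) hi
  have hall2 : ∀ i : Int, 0 ≤ i → i ≤ a + 1 - 1 → PySem.List.pyGetD s2 i "" = "<" := by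
    intro i hi0 hi1
    rw [hG2 i hi0, if_neg (by omega), hG1 i hi0]
    split_ifs with hia
    · rfl
    · exact hpref i hi0 (by omega)
  rw [pvGoLeft f2 s2 (a+1-1) n (c+1+1) ns (by omega) (by omega) (by omega) hall2 (by omega)]
  ring

theorem pvGo_len_one {s : List String} {a n c : Int} {ns : List String} (f : Nat)
    (h : s.length = 1) : shiftGo (f + 1) s a n c ns = 1 := by
  rw [shiftGo]
  simp [h]

-- ===== VERDICT (by name: the statement is the Claim_ definition above) =====
theorem shift_spec : Claim_equal_shift := by
  intro string a n shiftCount ns _ hpre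
  unfold Spec_shift
  by_cases hL1 : string.length = 1
  · -- len == 1: both sides return 1 immediately
    unfold shift
    have hsplit : 3 * string.length * string.length + 2 * string.length + 2
        = (3 * string.length * string.length + 2 * string.length + 1) + 1 := by omega
    rw [hsplit, pvGo_len_one _ hL1]
    simp [shift_alt, hL1]
  · rcases hpre with h1 | ⟨ha0, ha1, hX⟩
    · exact absurd h1 hL1
    · have hfuelBig : (string.length : Int) ≤ ((3 * string.length * string.length + 2 * string.length + 2 : Nat) : Int) := by
        push_cast
        nlinarith [sq_nonneg ((string.length : Int))]
      rcases hX with ⟨hnl, htake | htakeR⟩ | ⟨halen, htakeL⟩ | ⟨hb1, hb2, hbpref, hbA, hbB⟩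
      · -- the whole arena is arrows: the closed form counts the bounce exactly
        have harrI : ∀ i : Int, 0 ≤ i → i < n →
            (PySem.List.pyGetD string i "" = "<" ∨ PySem.List.pyGetD string i "" = ">") := by
          intro i hi0 hi1
          have hilen : i < (string.length : Int) := by omega
          rw [PySem.List.pyGetD_eq_getElem string "" hi0 hilen]
          apply htake
          have hlen : i.toNat < (string.take n.toNat).length := by
            rw [List.length_take]; omega
          have hget : (string.take n.toNat)[i.toNat]'hlen = string[i.toNat]'(by omega) :=
            List.getElem_take
          rw [← hget]
          exact List.getElem_mem _
        have hv : PVValid string a n := ⟨ha0, ha1, hnl, harrI, hL1⟩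
        have hfuel : pvF string a n ≤ ((3 * string.length * string.length + 2 * string.length + 2 : Nat) : Int) := by
          have := pvF_bound hv
          push_cast
          linarith
        rw [pvAlt_shiftCount n shiftCount ns hL1 (harrI a ha0 ha1)]
        unfold shift
        rw [pvShiftGo_eq _ _ _ _ _ _ hv hfuel]
      · -- string[a:n] is all '>': the ball runs straight out to the right
        have hRrun : ∀ i : Int, a ≤ i → i < n → PySem.List.pyGetD string i "" = ">" := by
          intro i hi0 hi1
          have hilen : i < (string.length : Int) := by omega
          rw [PySem.List.pyGetD_eq_getElem string "" (by omega) hilen]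
          apply htakeR
          have hlen : i.toNat - a.toNat < ((string.take n.toNat).drop a.toNat).length := by
            simp [List.length_take, List.length_drop]; omega
          have hget : ((string.take n.toNat).drop a.toNat)[i.toNat - a.toNat]'hlen
              = string[i.toNat]'(by omega) := by
            rw [List.getElem_drop]
            have h1 : a.toNat + (i.toNat - a.toNat) = i.toNat := by omega
            simp only [List.getElem_take, h1]
          rw [← hget]
          exact List.getElem_mem _
        rw [pvAlt_rightRun shiftCount ns hL1 hnl ha0 ha1 hRrun]
        unfold shift
        rw [pvGoRight _ _ _ _ _ _ hL1 ha0 ha1 hnl hRrun (by omega)]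
      · -- string[0:a+1] is all '<': the ball runs straight out to the left
        have hLrun : ∀ i : Int, 0 ≤ i → i ≤ a → PySem.List.pyGetD string i "" = "<" := by
          intro i hi0 hi1
          have hilen : i < (string.length : Int) := by omega
          rw [PySem.List.pyGetD_eq_getElem string "" hi0 hilen]
          apply htakeL
          have hlen : i.toNat < (string.take (a+1).toNat).length := by
            rw [List.length_take]; omega
          have hget : (string.take (a+1).toNat)[i.toNat]'hlen = string[i.toNat]'(by omega) :=
            List.getElem_take
          rw [← hget]
          exact List.getElem_mem _
        rw [pvAlt_leftRun shiftCount ns hL1 ha0 ha1 halen hLrun]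
        unfold shift
        rw [pvGoLeft _ _ _ _ _ _ hL1 ha0 halen hLrun (by omega)]
      · -- '<'*a ++ "><" at a: one bounce right, then the ball runs straight out to the left
        have hprefI : ∀ i : Int, 0 ≤ i → i < a → PySem.List.pyGetD string i "" = "<" := by
          intro i hi0 hi1
          have hilen : i < (string.length : Int) := by omega
          rw [PySem.List.pyGetD_eq_getElem string "" hi0 hilen]
          apply hbpref
          have hlen : i.toNat < (string.take a.toNat).length := by
            rw [List.length_take]; omega
          have hget : (string.take a.toNat)[i.toNat]'hlen = string[i.toNat]'(by omega) :=
            List.getElem_take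
          rw [← hget]
          exact List.getElem_mem _
        have hca : PySem.List.pyGetD string a "" = ">" := by
          obtain ⟨_, hget⟩ := List.getElem?_eq_some_iff.mp hbA
          rw [PySem.List.pyGetD_eq_getElem string "" ha0 (by omega)]
          exact hget
        have hcb : PySem.List.pyGetD string (a+1) "" = "<" := by
          obtain ⟨_, hget⟩ := List.getElem?_eq_some_iff.mp hbB
          rw [PySem.List.pyGetD_eq_getElem string "" (by omega) (by omega)]
          exact hget
        rw [pvAlt_bounce shiftCount ns hL1 ha0 hb1 hb2 hprefI hca hcb]
        unfold shift
        rw [pvGoBounce _ shiftCount ns hL1 ha0 hb1 hb2 hprefI hca hcb (by omega)]
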